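-- pv_equiv track=rewrite | github.com/marcelowf/Analysis-of-Lotofacil-subsets | Data_Analysis/SB15_12.py | find_subsets_of_15_that_contain_12
-- ===== SOURCE A (Python) =====
-- def find_subsets_of_15_that_contain_12(combinations_15, combinations_12):
--     subset = []
--     set_12 = set(map(tuple, combinations_12))
--
--     for comb15 in combinations_15:
--         comb15_set = set(comb15)
--         matching_subsets = {subset_12 for subset_12 in set_12 if set(subset_12).issubset(comb15_set)}
--         if matching_subsets:
--             subset.append(comb15)
--             set_12 -= matching_subsets
--         if not set_12:
--             break
--
--     return subset
-- ===== SOURCE B (Python) =====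
-- def find_subsets_of_15_that_contain_12(combinations_15, combinations_12):
--     # Inverted traversal: each 12-combo is consumed by the FIRST 15-combo that
--     # contains it, so collect those first-match indices and emit the matching
--     # 15-combos in one filtering pass.
--     idxs = set()
--     for comb12 in combinations_12:
--         need = set(comb12)
--         for i, comb15 in enumerate(combinations_15):
--             if need.issubset(comb15):
--                 idxs.add(i)
--                 break
--     return [comb15 for i, comb15 in enumerate(combinations_15) if i in idxs]
-- ===== Notes on version B (the rewrite author's own statement) =====
-- stated objective: alternative
-- what changed: Inverts the traversal: instead of scanning the shrinking set of 12-combos once per 15-combo (appending and subtracting matches as it goes), B finds for each 12-combo the index of the first 15-combo that contains it, collects those first-match indices in a set, and emits the matching 15-combos in one enumerate-filter pass.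
import Mathlib
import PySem

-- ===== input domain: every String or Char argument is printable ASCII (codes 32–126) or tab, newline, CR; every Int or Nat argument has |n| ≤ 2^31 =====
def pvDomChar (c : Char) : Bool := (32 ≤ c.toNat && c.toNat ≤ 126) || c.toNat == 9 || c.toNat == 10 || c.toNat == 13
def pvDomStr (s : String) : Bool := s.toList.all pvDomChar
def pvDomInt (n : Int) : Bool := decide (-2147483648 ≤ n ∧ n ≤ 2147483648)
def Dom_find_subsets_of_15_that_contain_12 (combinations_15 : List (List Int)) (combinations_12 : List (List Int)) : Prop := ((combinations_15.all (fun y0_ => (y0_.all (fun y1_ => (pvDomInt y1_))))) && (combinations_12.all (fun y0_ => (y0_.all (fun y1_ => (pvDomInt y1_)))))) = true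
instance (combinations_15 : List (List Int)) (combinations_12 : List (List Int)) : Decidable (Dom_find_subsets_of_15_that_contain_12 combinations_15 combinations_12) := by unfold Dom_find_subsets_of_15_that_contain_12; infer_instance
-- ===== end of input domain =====

-- B replaces A's forward scan (which re-filters the shrinking set of 12-combos at every
-- 15-combo) by an inverted traversal: each 12-combo finds the FIRST 15-combo containing it,
-- and the matching 15-combos are emitted in one filtering pass (objective: alternative).

-- ===== PORT A =====
-- set(subset_12).issubset(comb15_set): every element of subset_12 occurs in comb15
def pvIsSub (t c : List Int) : Bool := (PySem.Set.ofList t).all (fun x => c.contains x)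

-- A's 'for comb15 in combinations_15' loop with its two ifs and the break
def pvGoA (cs : List (List Int)) (subset : List (List Int)) (set12 : PySem.Set (List Int)) : List (List Int) :=
  match cs with
  | [] => subset
  | c :: rest =>
    let matching := set12.filter (fun t => pvIsSub t c)   -- set comprehension over set_12 (membership-only use)
    if matching.isEmpty then
      (if set12.isEmpty then subset else pvGoA rest subset set12)   -- 'if not set_12: break'
    else
      let subset' := subset ++ [c]
      let set12' := PySem.Set.diff set12 matching                   -- set_12 -= matching_subsets
      if set12'.isEmpty then subset' else pvGoA rest subset' set12'

def find_subsets_of_15_that_contain_12 (combinations_15 : List (List Int)) (combinations_12 : List (List Int)) : List (List Int) :=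
  pvGoA combinations_15 [] (PySem.Set.ofList combinations_12)

-- ===== PORT B =====
-- inner 'for i, comb15 in enumerate(combinations_15): if need.issubset(comb15): ...; break'
def pvFidx (need : List Int) (cs : List (List Int)) (i : Int) : Option Int :=
  match cs with
  | [] => none
  | c :: rest => if need.all (fun x => c.contains x) then some i else pvFidx need rest (i + 1)

def find_subsets_of_15_that_contain_12_alt (combinations_15 : List (List Int)) (combinations_12 : List (List Int)) : List (List Int) :=
  let idxs : PySem.Set Int := combinations_12.foldl (fun s t =>
      match pvFidx (PySem.Set.ofList t) combinations_15 0 with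
      | some i => PySem.Set.add s i
      | none => s) PySem.Set.empty
  ((PySem.List.enumerate combinations_15).filter (fun p => PySem.Set.contains idxs p.1)).map (·.2)

-- ===== PRECONDITION & SPEC =====
def Spec_find_subsets_of_15_that_contain_12 (combinations_15 : List (List Int)) (combinations_12 : List (List Int)) (out : List (List Int)) : Prop := out = find_subsets_of_15_that_contain_12_alt combinations_15 combinations_12
instance (combinations_15 : List (List Int)) (combinations_12 : List (List Int)) (out : List (List Int)) : Decidable (Spec_find_subsets_of_15_that_contain_12 combinations_15 combinations_12 out) := by unfold Spec_find_subsets_of_15_that_contain_12; infer_instance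

-- ===== CLAIM (what is proved, stated in full; the proofs are below) =====
def Claim_equal_find_subsets_of_15_that_contain_12 : Prop := ∀ (combinations_15 : List (List Int)) (combinations_12 : List (List Int)), Dom_find_subsets_of_15_that_contain_12 combinations_15 combinations_12 → Spec_find_subsets_of_15_that_contain_12 combinations_15 combinations_12 (find_subsets_of_15_that_contain_12 combinations_15 combinations_12)

-- ===== LEMMAS AND PROOFS =====

-- reference function: both ports compute pvR combinations_15 combinations_12
def pvR (cs : List (List Int)) (l : List (List Int)) : List (List Int) :=
  match cs with
  | [] => []
  | c :: rest =>
    if l.any (fun t => pvIsSub t c) then c :: pvR rest (l.filter (fun t => !pvIsSub t c))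
    else pvR rest l

theorem pvR_nil (cs : List (List Int)) : pvR cs [] = [] := by
  induction cs with
  | nil => rfl
  | cons c rest ih => simp [pvR, ih]

theorem pvGoA_eq (cs : List (List Int)) : ∀ (s l l' : List (List Int)),
    (∀ t, t ∈ l ↔ t ∈ l') → pvGoA cs s l = s ++ pvR cs l' := by
  induction cs with
  | nil => intro s l l' _; simp [pvGoA, pvR]
  | cons c rest ih =>
    intro s l l' hm
    have hany : l'.any (fun t => pvIsSub t c) = l.any (fun t => pvIsSub t c) := by
      rcases h : l.any (fun t => pvIsSub t c) with _ | _
      · simp only [List.any_eq_false] at h ⊢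
        intro t ht; exact h t ((hm t).mpr ht)
      · simp only [List.any_eq_true] at h ⊢
        obtain ⟨t, ht, hs⟩ := h; exact ⟨t, (hm t).mp ht, hs⟩
    by_cases h : l.any (fun t => pvIsSub t c) = true
    · -- matching nonempty
      obtain ⟨t0, ht0, hs0⟩ := List.any_eq_true.mp h
      have hmne : (l.filter (fun t => pvIsSub t c)).isEmpty = false := by
        rcases he : (l.filter (fun t => pvIsSub t c)).isEmpty with _ | _
        · rfl
        · exfalso
          have := List.isEmpty_iff.mp he
          have : t0 ∈ (l.filter (fun t => pvIsSub t c)) := List.mem_filter.mpr ⟨ht0, hs0⟩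
          simp_all
      have hdm : ∀ t, t ∈ PySem.Set.diff l (l.filter (fun t => pvIsSub t c)) ↔
          t ∈ l'.filter (fun t => !pvIsSub t c) := by
        intro t
        simp only [PySem.Set.mem_diff, List.mem_filter, hm t]
        rcases hst : pvIsSub t c with _ | _ <;> simp
      simp only [pvGoA, pvR, hmne, hany, h, if_true, Bool.false_eq_true, if_false]
      by_cases hde : (PySem.Set.diff l (l.filter (fun t => pvIsSub t c))).isEmpty = true
      · have hnil : l'.filter (fun t => !pvIsSub t c) = [] := by
          rw [List.eq_nil_iff_forall_not_mem]
          intro t ht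
          have := (hdm t).mpr ht
          rw [List.isEmpty_iff.mp hde] at this
          simp at this
        simp [hde, hnil, pvR_nil]
      · simp only [hde, if_false, Bool.false_eq_true]
        rw [ih (s ++ [c]) _ _ hdm, List.append_assoc]
        rfl
    · -- matching empty
      have h' : l.any (fun t => pvIsSub t c) = false := by simp_all
      have hme : (l.filter (fun t => pvIsSub t c)).isEmpty = true := by
        rw [List.isEmpty_iff, List.filter_eq_nil_iff]
        intro t ht
        simp only [List.any_eq_false] at h'
        simp [h' t ht]
      simp only [pvGoA, pvR, hme, hany, h', if_true, Bool.false_eq_true, if_false]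
      by_cases hle : l.isEmpty = true
      · have : l = [] := List.isEmpty_iff.mp hle
        subst this
        have : l' = [] := by
          rw [List.eq_nil_iff_forall_not_mem]; intro t ht; simpa using (hm t).mpr ht
        simp [hle, this, pvR_nil]
      · simp only [hle, if_false, Bool.false_eq_true]
        exact ih s l l' hm

theorem pvFidx_lb (need : List Int) (cs : List (List Int)) : ∀ (j i : Int),
    pvFidx need cs j = some i → j ≤ i := by
  induction cs with
  | nil => intro j i h; simp [pvFidx] at h
  | cons c rest ih =>
    intro j i h
    simp only [pvFidx] at h
    split at h
    · cases h; omega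
    · have := ih (j + 1) i h; omega

theorem pvMemFold (cs : List (List Int)) (l12 : List (List Int)) : ∀ (s : PySem.Set Int) (i : Int),
    i ∈ l12.foldl (fun s t =>
      match pvFidx (PySem.Set.ofList t) cs 0 with
      | some j => PySem.Set.add s j
      | none => s) s ↔ i ∈ s ∨ ∃ t ∈ l12, pvFidx (PySem.Set.ofList t) cs 0 = some i := by
  induction l12 with
  | nil => intro s i; simp
  | cons t rest ih =>
    intro s i
    simp only [List.foldl_cons]
    rcases hf : pvFidx (PySem.Set.ofList t) cs 0 with _ | j
    · rw [ih]
      simp [hf]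
    · rw [ih, PySem.Set.mem_add]
      simp only [List.mem_cons]
      constructor
      · rintro (⟨hs | rfl⟩ | ⟨u, hu, he⟩)
        · exact Or.inl hs
        · exact Or.inr ⟨t, Or.inl rfl, hf⟩
        · exact Or.inr ⟨u, Or.inr hu, he⟩
      · rintro (hs | ⟨u, hu | hu, he⟩)
        · exact Or.inl (Or.inl hs)
        · subst hu; rw [hf] at he; cases he; exact Or.inl (Or.inr rfl)
        · exact Or.inr ⟨u, hu, he⟩

theorem pvFstEnum (cs : List (List Int)) : ∀ (s : Int) (p : Int × List Int),
    p ∈ PySem.List.enumerate cs s → s ≤ p.1 := by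
  induction cs with
  | nil => intro s p h; simp [PySem.List.enumerate_nil] at h
  | cons c rest ih =>
    intro s p h
    rw [PySem.List.enumerate_cons] at h
    rcases List.mem_cons.mp h with rfl | h
    · simp
    · have := ih (s + 1) p h; omega

theorem pvMain (cs : List (List Int)) : ∀ (l : List (List Int)) (k : Int),
    ((PySem.List.enumerate cs k).filter
        (fun p => l.any (fun t => pvFidx (PySem.Set.ofList t) cs k == some p.1))).map (·.2)
      = pvR cs l := by
  induction cs with
  | nil => intro l k; simp [PySem.List.enumerate_nil, pvR]
  | cons c rest ih =>
    intro l k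
    rw [PySem.List.enumerate_cons]
    have hsub : ∀ t : List Int,
        pvFidx (PySem.Set.ofList t) (c :: rest) k
          = if pvIsSub t c then some k else pvFidx (PySem.Set.ofList t) rest (k + 1) := by
      intro t; rfl
    have hhead : (l.any (fun t => pvFidx (PySem.Set.ofList t) (c :: rest) k == some k))
        = l.any (fun t => pvIsSub t c) := by
      apply PySem.List.any_congr_mem
      intro t _
      rw [hsub]
      rcases hs : pvIsSub t c with _ | _
      · simp only [Bool.false_eq_true, if_false]
        rcases hf : pvFidx (PySem.Set.ofList t) rest (k + 1) with _ | j
        · rfl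
        · have := pvFidx_lb _ _ _ _ hf
          rw [beq_eq_false_iff_ne]
          simp only [ne_eq, Option.some.injEq]
          omega
      · simp
    have htail : ∀ p : Int × List Int, p ∈ PySem.List.enumerate rest (k + 1) →
        (l.any (fun t => pvFidx (PySem.Set.ofList t) (c :: rest) k == some p.1))
          = ((l.filter (fun t => !pvIsSub t c)).any
              (fun t => pvFidx (PySem.Set.ofList t) rest (k + 1) == some p.1)) := by
      intro p hp
      have hk := pvFstEnum rest (k + 1) p hp
      rw [List.any_filter]
      apply PySem.List.any_congr_mem
      intro t _
      rw [hsub]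
      rcases hs : pvIsSub t c with _ | _
      · simp
      · simp only [Bool.not_true, Bool.false_and]
        simp only [if_true]
        rw [beq_eq_false_iff_ne]
        simp only [ne_eq, Option.some.injEq]
        omega
    rcases h : l.any (fun t => pvIsSub t c) with _ | _
    · -- head not selected
      have hfe : l.filter (fun t => !pvIsSub t c) = l := by
        apply List.filter_eq_self.mpr
        intro t ht
        simp only [List.any_eq_false] at h
        simp [h t ht]
      rw [List.filter_cons]
      simp only [hhead, h, Bool.false_eq_true, if_false]
      rw [List.filter_congr htail, hfe, ih l (k + 1)]
      simp [pvR, h]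
    · -- head selected
      rw [List.filter_cons]
      simp only [hhead, h, if_true]
      rw [List.filter_congr htail, List.map_cons, ih (l.filter (fun t => !pvIsSub t c)) (k + 1)]
      simp [pvR, h]

-- ===== VERDICT (by name: the statement is the Claim_ definition above) =====
theorem find_subsets_of_15_that_contain_12_spec : Claim_equal_find_subsets_of_15_that_contain_12 := by
  intro c15 c12 _
  unfold Spec_find_subsets_of_15_that_contain_12
  have hA : find_subsets_of_15_that_contain_12 c15 c12 = pvR c15 c12 := by
    unfold find_subsets_of_15_that_contain_12
    rw [pvGoA_eq c15 [] (PySem.Set.ofList c12) c12 (fun t => PySem.Set.mem_ofList c12 t)]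
    simp
  have hB : find_subsets_of_15_that_contain_12_alt c15 c12 = pvR c15 c12 := by
    show ((PySem.List.enumerate c15).filter (fun p => PySem.Set.contains (c12.foldl (fun s t =>
        match pvFidx (PySem.Set.ofList t) c15 0 with
        | some i => PySem.Set.add s i
        | none => s) PySem.Set.empty) p.1)).map (·.2) = pvR c15 c12
    rw [← pvMain c15 c12 0]
    apply congrArg
    apply List.filter_congr
    intro p _
    rcases hc : PySem.Set.contains (c12.foldl (fun s t =>
        match pvFidx (PySem.Set.ofList t) c15 0 with
        | some i => PySem.Set.add s i
        | none => s) PySem.Set.empty) p.1 with _ | _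
    · symm
      simp only [List.any_eq_false]
      intro t ht hbe
      have hmem : (p.1 : Int) ∈ c12.foldl (fun s t =>
          match pvFidx (PySem.Set.ofList t) c15 0 with
          | some i => PySem.Set.add s i
          | none => s) PySem.Set.empty := by
        rw [pvMemFold]
        exact Or.inr ⟨t, ht, by simpa using hbe⟩
      rw [← PySem.Set.contains_iff] at hmem
      simp_all
    · symm
      rw [PySem.Set.contains_iff] at hc
      rw [pvMemFold] at hc
      rcases hc with hc | ⟨t, ht, he⟩
      · simp [PySem.Set.empty] at hc
      · exact List.any_eq_true.mpr ⟨t, ht, by simpa using he⟩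
  rw [hA, hB]
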